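-- pv_equiv track=rewrite | github.com/Nathan0922/boat | ship.py | update_targets
-- ===== SOURCE A (Python) =====
-- def update_targets(leader_pos, formation):
--     if formation == "kite":
--         return [[leader_pos[0] - 60, leader_pos[1] - 30],
--                 [leader_pos[0] - 60, leader_pos[1] + 30],
--                 [leader_pos[0] - 120, leader_pos[1] - 60],
--                 [leader_pos[0] - 120, leader_pos[1] + 60]]
--     elif formation == "circle":
--         return [[leader_pos[0] - 60, leader_pos[1]],
--                 [leader_pos[0] + 60, leader_pos[1]],
--                 [leader_pos[0], leader_pos[1] - 60],
--                 [leader_pos[0], leader_pos[1] + 60]]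
--     elif formation == "arrow":
--         return [[leader_pos[0] - 60, leader_pos[1] - 30],
--                 [leader_pos[0] - 60, leader_pos[1] + 30],
--                 [leader_pos[0] - 120, leader_pos[1] - 15],
--                 [leader_pos[0] - 120, leader_pos[1] + 15]]
--     else:  # 默認直線排列
--         return [[leader_pos[0] - 60 * (i + 1), leader_pos[1]] for i in range(4)]
-- ===== SOURCE B (Python) =====
-- def _offset(formation, i):
--     # Offsets computed arithmetically from the slot index instead of literal tables:
--     # row = i // 2 (depth behind the leader), sign alternates -,+ within a row.
--     sign = 1 if i % 2 else -1
--     row = i // 2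
--     if formation == "kite":
--         return (-60 * (row + 1), 30 * (row + 1) * sign)
--     if formation == "circle":
--         return (60 * sign, 0) if row == 0 else (0, 60 * sign)
--     if formation == "arrow":
--         return (-60 * (row + 1), (30 // (row + 1)) * sign)
--     return (-60 * (i + 1), 0)
--
-- def update_targets(leader_pos, formation):
--     x, y = leader_pos[0], leader_pos[1]
--     out = []
--     for i in range(4):
--         dx, dy = _offset(formation, i)
--         out.append([x + dx, y + dy])
--     return out
-- ===== Notes on version B (the rewrite author's own statement) =====
-- stated objective: alternative
-- what changed: Instead of A's four branches each returning hand-written literal coordinate lists, B generates the four positions in one loop, computing each offset arithmetically from the slot index (row = i//2, alternating sign, per-formation scaling) with no literal offset lists at all.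
-- outside the precondition, e.g. on update_targets([5], 'kite'): A raises IndexError, B raises IndexError
import Mathlib
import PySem

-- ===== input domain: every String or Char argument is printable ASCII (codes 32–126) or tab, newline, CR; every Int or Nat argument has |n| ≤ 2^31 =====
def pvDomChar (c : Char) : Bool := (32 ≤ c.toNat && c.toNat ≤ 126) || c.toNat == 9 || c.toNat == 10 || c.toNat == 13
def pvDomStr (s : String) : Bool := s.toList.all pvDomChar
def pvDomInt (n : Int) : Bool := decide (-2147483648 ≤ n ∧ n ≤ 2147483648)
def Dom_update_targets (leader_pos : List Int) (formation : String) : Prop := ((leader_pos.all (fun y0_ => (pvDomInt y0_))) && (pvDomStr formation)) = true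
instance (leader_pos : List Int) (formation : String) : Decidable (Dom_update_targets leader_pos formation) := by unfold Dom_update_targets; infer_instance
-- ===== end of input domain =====

-- B replaces A's four branches of hand-written literal coordinate lists by one loop that
-- computes each offset arithmetically from the slot index (objective: alternative).

-- ===== PORT A =====
-- leader_pos[0]/leader_pos[1] via pyGetD: exact under Pre_ (list has ≥ 2 elements, so no IndexError)
def update_targets (leader_pos : List Int) (formation : String) : List (List Int) :=
  let x := PySem.List.pyGetD leader_pos 0 0
  let y := PySem.List.pyGetD leader_pos 1 0
  if formation == "kite" then
    [[x - 60, y - 30], [x - 60, y + 30], [x - 120, y - 60], [x - 120, y + 60]]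
  else if formation == "circle" then
    [[x - 60, y], [x + 60, y], [x, y - 60], [x, y + 60]]
  else if formation == "arrow" then
    [[x - 60, y - 30], [x - 60, y + 30], [x - 120, y - 15], [x - 120, y + 15]]
  else
    (PySem.List.pyRange 0 4 1).map (fun i => [x - 60 * (i + 1), y])

-- ===== PORT B =====
def pvOffset (formation : String) (i : Int) : Int × Int :=
  let sign : Int := if PySem.Int.mod i 2 ≠ 0 then 1 else -1
  let row : Int := PySem.Int.floordiv i 2
  if formation == "kite" then
    (-60 * (row + 1), 30 * (row + 1) * sign)
  else if formation == "circle" then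
    if row == 0 then (60 * sign, 0) else (0, 60 * sign)
  else if formation == "arrow" then
    (-60 * (row + 1), (PySem.Int.floordiv 30 (row + 1)) * sign)
  else
    (-60 * (i + 1), 0)

def update_targets_alt (leader_pos : List Int) (formation : String) : List (List Int) :=
  let x := PySem.List.pyGetD leader_pos 0 0
  let y := PySem.List.pyGetD leader_pos 1 0
  (PySem.List.pyRange 0 4 1).foldl
    (fun out i =>
      let d := pvOffset formation i
      out ++ [[x + d.1, y + d.2]]) []

-- ===== PRECONDITION & SPEC =====
-- Pre_ excludes exactly the inputs on which A raises IndexError: lists with fewer than 2 elements.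
def Pre_update_targets (leader_pos : List Int) (formation : String) : Prop :=
  2 ≤ leader_pos.length
instance (leader_pos : List Int) (formation : String) : Decidable (Pre_update_targets leader_pos formation) := by unfold Pre_update_targets; infer_instance

def pvWitness_update_targets : List Int × String := ([10, 20], "kite")

def Spec_update_targets (leader_pos : List Int) (formation : String) (out : List (List Int)) : Prop := out = update_targets_alt leader_pos formation
instance (leader_pos : List Int) (formation : String) (out : List (List Int)) : Decidable (Spec_update_targets leader_pos formation out) := by unfold Spec_update_targets; infer_instance

-- ===== CLAIM =====
def Claim_equal_update_targets : Prop := ∀ (leader_pos : List Int) (formation : String), Dom_update_targets leader_pos formation → Pre_update_targets leader_pos formation → Spec_update_targets leader_pos formation (update_targets leader_pos formation)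

-- ===== LEMMAS AND PROOFS =====
theorem rng4 : PySem.List.pyRange 0 4 1 = [0, 1, 2, 3] := by decide

theorem alt_unfolded (leader_pos : List Int) (formation : String) :
    update_targets_alt leader_pos formation =
      let x := PySem.List.pyGetD leader_pos 0 0
      let y := PySem.List.pyGetD leader_pos 1 0
      [[x + (pvOffset formation 0).1, y + (pvOffset formation 0).2],
       [x + (pvOffset formation 1).1, y + (pvOffset formation 1).2],
       [x + (pvOffset formation 2).1, y + (pvOffset formation 2).2],
       [x + (pvOffset formation 3).1, y + (pvOffset formation 3).2]] := by
  unfold update_targets_alt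
  rw [rng4]
  rfl

-- ===== VERDICT =====
theorem update_targets_spec : Claim_equal_update_targets := by
  intro lp f _ _
  unfold Spec_update_targets
  rw [alt_unfolded]
  unfold update_targets
  by_cases h1 : f = "kite"
  · subst h1
    rw [show pvOffset "kite" 0 = ((-60 : Int), (-30 : Int)) from by decide,
        show pvOffset "kite" 1 = ((-60 : Int), (30 : Int)) from by decide,
        show pvOffset "kite" 2 = ((-120 : Int), (-60 : Int)) from by decide,
        show pvOffset "kite" 3 = ((-120 : Int), (60 : Int)) from by decide,
        if_pos (beq_self_eq_true "kite")]
    norm_num [sub_eq_add_neg]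
  · by_cases h2 : f = "circle"
    · subst h2
      rw [show pvOffset "circle" 0 = ((-60 : Int), (0 : Int)) from by decide,
          show pvOffset "circle" 1 = ((60 : Int), (0 : Int)) from by decide,
          show pvOffset "circle" 2 = ((0 : Int), (-60 : Int)) from by decide,
          show pvOffset "circle" 3 = ((0 : Int), (60 : Int)) from by decide,
          if_neg (by decide : ¬ ("circle" == "kite") = true),
          if_pos (beq_self_eq_true "circle")]
      norm_num [sub_eq_add_neg]
    · by_cases h3 : f = "arrow"
      · subst h3
        rw [show pvOffset "arrow" 0 = ((-60 : Int), (-30 : Int)) from by decide,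
            show pvOffset "arrow" 1 = ((-60 : Int), (30 : Int)) from by decide,
            show pvOffset "arrow" 2 = ((-120 : Int), (-15 : Int)) from by decide,
            show pvOffset "arrow" 3 = ((-120 : Int), (15 : Int)) from by decide,
            if_neg (by decide : ¬ ("arrow" == "kite") = true),
            if_neg (by decide : ¬ ("arrow" == "circle") = true),
            if_pos (beq_self_eq_true "arrow")]
        norm_num [sub_eq_add_neg]
      · have o0 : pvOffset f 0 = (-60 * (0 + 1), 0) := by
          simp [pvOffset, h1, h2, h3]
        have o1 : pvOffset f 1 = (-60 * (1 + 1), 0) := by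
          simp [pvOffset, h1, h2, h3]
        have o2 : pvOffset f 2 = (-60 * (2 + 1), 0) := by
          simp [pvOffset, h1, h2, h3]
        have o3 : pvOffset f 3 = (-60 * (3 + 1), 0) := by
          simp [pvOffset, h1, h2, h3]
        rw [o0, o1, o2, o3,
            if_neg (by simpa using h1), if_neg (by simpa using h2),
            if_neg (by simpa using h3), rng4]
        norm_num [sub_eq_add_neg]
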